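-- pv_equiv track=rewrite | github.com/AdamZhouSE/pythonHomework | Code/CodeRecords/2510/60761/279850.py | adddig
-- ===== SOURCE A (Python) =====
-- def adddig(x,z,levels,n):
--     add=[0 for i in range(n)]
--     for i in range(len(levels)):
--         if(levels[i][0]==x):
--             for j in levels[i][1]:
--                 add[j-1]+=z
--                 temp=adddig(j,z,levels,n)
--                 for i in range(n):
--                     add[i]+=temp[i]
--             break
--     return add
-- ===== SOURCE B (Python) =====
-- def adddig(x, z, levels, n):
--     # iterative breadth-first frontier loop over a first-occurrence children dict
--     children = {}
--     for k, cs in levels: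
--         children.setdefault(k, cs)
--     add = [0] * n
--     frontier = [x]
--     while frontier:
--         nxt = []
--         for v in frontier:
--             for j in children.get(v, []):
--                 add[j - 1] += z
--                 nxt.append(j)
--         frontier = nxt
--     return add
-- ===== Notes on version B (the rewrite author's own statement) =====
-- stated objective: alternative
-- what changed: Replaces A's value-returning recursion (a fresh zero vector per call, pointwise vector merging, and a linear scan of levels per call) by a first-occurrence children dict built once and an iterative breadth-first frontier loop that mutates a single accumulator array.
import Mathlib
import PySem

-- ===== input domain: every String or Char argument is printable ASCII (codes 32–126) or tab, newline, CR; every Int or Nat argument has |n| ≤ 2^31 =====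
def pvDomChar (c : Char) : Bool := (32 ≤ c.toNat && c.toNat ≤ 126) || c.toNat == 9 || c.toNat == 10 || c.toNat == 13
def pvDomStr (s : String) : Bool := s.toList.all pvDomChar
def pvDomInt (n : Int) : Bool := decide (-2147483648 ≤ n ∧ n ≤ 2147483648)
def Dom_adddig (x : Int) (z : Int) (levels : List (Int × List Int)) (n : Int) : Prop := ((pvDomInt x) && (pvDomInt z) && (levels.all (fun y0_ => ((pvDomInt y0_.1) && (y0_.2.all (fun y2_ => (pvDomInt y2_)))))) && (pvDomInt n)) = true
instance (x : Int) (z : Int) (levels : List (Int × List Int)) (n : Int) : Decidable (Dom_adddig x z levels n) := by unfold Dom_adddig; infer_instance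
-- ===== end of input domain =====

-- B replaces A's value-returning recursion (fresh zero vector per call, pointwise merging, a scan
-- of `levels` per call) by a first-occurrence children dict built once and an iterative
-- breadth-first frontier loop mutating one accumulator (objective: alternative algorithm).

-- ===== PORT A =====
-- Python 'l[i] += v' (negative indices wrap); where Python raises IndexError (excluded by Pre_)
-- the list is returned unchanged.
def pvAddAt (l : List Int) (i : Int) (v : Int) : List Int :=
  let k : Int := if i < 0 then i + l.length else i
  if 0 ≤ k ∧ k < l.length then l.set k.toNat (l.getD k.toNat 0 + v) else l

-- A's recursion, with a fuel guard making it total; under Pre_ the recursion depth is at most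
-- levels.length + 1 (no walk of length levels.length + 1 exists), so the fuel never runs out.
def adddigFuel : Nat → Int → Int → List (Int × List Int) → Int → List Int
  | 0, _, _, _, n => List.replicate n.toNat 0
  | fuel+1, x, z, levels, n =>
    -- 'for i in range(len(levels)): if levels[i][0]==x: …; break' = act on the first matching entry
    match levels.find? (fun e => e.1 == x) with
    | none => List.replicate n.toNat 0
    | some e =>
      -- for j in entry: add[j-1] += z; temp = adddig(j,z,levels,n); for i in range(n): add[i] += temp[i]
      e.2.foldl (fun add j =>
          List.zipWith (· + ·) (pvAddAt add (j - 1) z) (adddigFuel fuel j z levels n))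
        (List.replicate n.toNat 0)

def adddig (x : Int) (z : Int) (levels : List (Int × List Int)) (n : Int) : List Int :=
  adddigFuel (levels.length + 2) x z levels n

-- ===== PORT B =====
-- B's 'while frontier:' loop, fueled for totality; under Pre_ the frontier empties within
-- levels.length + 1 iterations, so the fuel never runs out.
def pvBfs (children : PySem.Dict Int (List Int)) (z : Int) : Nat → List Int → List Int → List Int
  | 0, _, add => add
  | fuel+1, frontier, add =>
    if frontier.isEmpty then add
    else
      -- nxt = []; for v in frontier: for j in children.get(v, []): add[j-1] += z; nxt.append(j)
      let st := frontier.foldl (fun (st : List Int × List Int) v =>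
          (children.getD v []).foldl (fun st j => (pvAddAt st.1 (j - 1) z, st.2 ++ [j])) st)
        (add, ([] : List Int))
      pvBfs children z fuel st.2 st.1

def adddig_alt (x : Int) (z : Int) (levels : List (Int × List Int)) (n : Int) : List Int :=
  let children : PySem.Dict Int (List Int) :=
    levels.foldl (fun d e => d.setdefault e.1 e.2) PySem.Dict.empty
  let add : List Int := List.replicate n.toNat 0
  pvBfs children z (levels.length + 2) [x] add

-- ===== PRECONDITION & SPEC =====
-- first-occurrence children list of a node (what A's break-loop and B's setdefault-dict both read)
def pvCh (levels : List (Int × List Int)) (u : Int) : List Int :=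
  ((levels.find? (fun e => e.1 == u)).map Prod.snd).getD []

-- one step of the child relation on a set of nodes, and its reflexive closure step
def pvStep (levels : List (Int × List Int)) (S : List Int) : List Int :=
  (S.flatMap (pvCh levels)).dedup
def pvClos (levels : List (Int × List Int)) (S : List Int) : List Int :=
  (S ++ S.flatMap (pvCh levels)).dedup

-- Pre_ = exactly the inputs on which Python A returns: (1) no directed walk of length
-- levels.length + 1 starts at x in the first-occurrence child graph (⟺ the part of the graph
-- reachable from x is acyclic; on a reachable cycle A raises RecursionError), and (2) every child
-- of every node reachable from x is a valid (possibly negative, Python-wrapping) index into the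
-- length-n list (otherwise A raises IndexError).
def Pre_adddig (x : Int) (z : Int) (levels : List (Int × List Int)) (n : Int) : Prop :=
  ((pvStep levels)^[levels.length + 1] [x] = []) ∧
  (∀ u ∈ (pvClos levels)^[levels.length + 1] [x],
     ∀ j ∈ pvCh levels u, 1 - n ≤ j ∧ j ≤ n)
instance (x : Int) (z : Int) (levels : List (Int × List Int)) (n : Int) : Decidable (Pre_adddig x z levels n) := by unfold Pre_adddig; infer_instance

def pvWitness_adddig : Int × Int × (List (Int × List Int)) × Int := (1, 5, [(1, [2, 3]), (2, [3])], 3)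

def Spec_adddig (x : Int) (z : Int) (levels : List (Int × List Int)) (n : Int) (out : List Int) : Prop := out = adddig_alt x z levels n
instance (x : Int) (z : Int) (levels : List (Int × List Int)) (n : Int) (out : List Int) : Decidable (Spec_adddig x z levels n out) := by unfold Spec_adddig; infer_instance

-- ===== CLAIM =====
def Claim_equal_adddig : Prop := ∀ (x : Int) (z : Int) (levels : List (Int × List Int)) (n : Int), Dom_adddig x z levels n → Pre_adddig x z levels n → Spec_adddig x z levels n (adddig x z levels n)

-- ===== LEMMAS AND PROOFS =====

-- pointwise sum of equally long vectors, Σ over a list of vectors, and the in-place add loop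
def pvV (a b : List Int) : List Int := List.zipWith (· + ·) a b
def pvSum (n : Int) (L : List Int) (f : Int → List Int) : List Int :=
  L.foldl (fun a u => pvV a (f u)) (List.replicate n.toNat 0)
def pvU (z : Int) (cs : List Int) (a : List Int) : List Int :=
  cs.foldl (fun a j => pvAddAt a (j - 1) z) a
-- frontier step with multiplicity (what B's loop actually traverses)
def pvMstep (levels : List (Int × List Int)) (F : List Int) : List Int :=
  F.flatMap (pvCh levels)

theorem length_pvAddAt (l : List Int) (i v : Int) : (pvAddAt l i v).length = l.length := by
  unfold pvAddAt
  by_cases hi : i < 0 <;> simp only [hi, if_true, if_false] <;> split <;> simp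
theorem length_pvV (a b : List Int) : (pvV a b).length = min a.length b.length := by simp [pvV]
theorem pvV_zeros_right (a : List Int) : pvV a (List.replicate a.length 0) = a := by
  apply List.ext_getElem <;> simp [pvV]
theorem pvV_zeros_left (a : List Int) : pvV (List.replicate a.length 0) a = a := by
  apply List.ext_getElem <;> simp [pvV]
theorem pvV_zeros_left' (N : Nat) (a : List Int) (h : a.length = N) :
    pvV (List.replicate N 0) a = a := by rw [← h]; exact pvV_zeros_left a
theorem pvV_zeros_right' (N : Nat) (a : List Int) (h : a.length = N) :
    pvV a (List.replicate N 0) = a := by rw [← h]; exact pvV_zeros_right a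
theorem pvV_assoc (a b c : List Int) : pvV (pvV a b) c = pvV a (pvV b c) := by
  apply List.ext_getElem
  · simp [pvV]; try omega
  · intro m h1 h2; simp [pvV]; ring
theorem pvV4 (a b c d : List Int) : pvV (pvV a b) (pvV c d) = pvV (pvV a c) (pvV b d) := by
  apply List.ext_getElem
  · simp [pvV]; try omega
  · intro m h1 h2; simp [pvV]; ring
theorem pvAddAt_getD (l : List Int) (k v : Int) (m : Nat) (hm : m < l.length) :
    (if 0 ≤ k ∧ k < (l.length : Int) then l.set k.toNat (l.getD k.toNat 0 + v) else l).getD m 0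
      = l.getD m 0 + (if k = (m : Int) then v else 0) := by
  by_cases hr : 0 ≤ k ∧ k < (l.length : Int)
  · rw [if_pos hr]
    by_cases hkm : k = (m : Int)
    · have ht : k.toNat = m := by omega
      simp [List.getD_eq_getElem, hm, List.getElem_set, ht, hkm]
    · have ht : ¬ (k.toNat = m) := by omega
      simp [List.getD_eq_getElem, hm, List.getElem_set, ht, hkm]
  · rw [if_neg hr]
    have hkm : ¬ (k = (m : Int)) := by omega
    simp [hkm]
theorem getElem_pvAddAt (l : List Int) (i v : Int) (m : Nat) (hm : m < l.length)
    (hm' : m < (pvAddAt l i v).length) :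
    (pvAddAt l i v)[m] = l[m] + (if (if i < 0 then i + l.length else i) = (m : Int) then v else 0) := by
  have h1 : (pvAddAt l i v)[m] = (pvAddAt l i v).getD m 0 := (List.getD_eq_getElem _ _ hm').symm
  have h2 : l[m] = l.getD m 0 := (List.getD_eq_getElem _ _ hm).symm
  rw [h1, h2]
  unfold pvAddAt
  exact pvAddAt_getD l _ v m hm
theorem pvAddAt_decomp (a : List Int) (i w : Int) :
    pvAddAt a i w = pvV a (pvAddAt (List.replicate a.length 0) i w) := by
  apply List.ext_getElem
  · simp [length_pvV, length_pvAddAt]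
  · intro m h1 h2
    have hm : m < a.length := by simpa [length_pvAddAt] using h1
    rw [getElem_pvAddAt a i w m hm h1]
    simp only [pvV, List.getElem_zipWith]
    rw [getElem_pvAddAt (List.replicate a.length 0) i w m (by simpa using hm)
          (by simpa [length_pvAddAt] using hm)]
    simp

theorem adddigFuel_length (z : Int) (levels : List (Int × List Int)) (n : Int) :
    ∀ (fuel : Nat) (u : Int), (adddigFuel fuel u z levels n).length = n.toNat := by
  intro fuel
  induction fuel with
  | zero => intro u; simp [adddigFuel]
  | succ f ih =>
    intro u
    cases hfind : levels.find? (fun e => e.1 == u) with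
    | none => simp [adddigFuel, hfind]
    | some e =>
      simp only [adddigFuel, hfind]
      have key : ∀ (cs : List Int) (a : List Int), a.length = n.toNat →
          (cs.foldl (fun add j =>
            List.zipWith (· + ·) (pvAddAt add (j - 1) z) (adddigFuel f j z levels n)) a).length
            = n.toNat := by
        intro cs
        induction cs with
        | nil => intro a ha; simpa
        | cons j t iht =>
          intro a ha
          exact iht _ (by simp [length_pvAddAt, ha, ih])
      exact key e.2 _ (by simp)

theorem length_pvSum (n : Int) (L : List Int) (f : Int → List Int)
    (hf : ∀ u ∈ L, (f u).length = n.toNat) : (pvSum n L f).length = n.toNat := by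
  have key : ∀ (M : List Int) (a : List Int), a.length = n.toNat →
      (∀ u ∈ M, (f u).length = n.toNat) →
      (M.foldl (fun a u => pvV a (f u)) a).length = n.toNat := by
    intro M
    induction M with
    | nil => intro a ha _; simpa
    | cons u t iht =>
      intro a ha hM
      exact iht _ (by simp [length_pvV, ha, hM u (by simp)])
        (fun w hw => hM w (by simp [hw]))
  exact key L _ (by simp) hf

theorem pvSum_affine (n : Int) (f : Int → List Int) :
    ∀ (L : List Int) (a : List Int), a.length = n.toNat → (∀ u ∈ L, (f u).length = n.toNat) →
    L.foldl (fun a u => pvV a (f u)) a = pvV a (pvSum n L f) := by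
  intro L
  induction L with
  | nil =>
    intro a ha _
    simp only [List.foldl_nil, pvSum]
    rw [← ha, pvV_zeros_right]
  | cons u t iht =>
    intro a ha hL
    have hu : (f u).length = n.toNat := hL u (by simp)
    have ht : ∀ w ∈ t, (f w).length = n.toNat := fun w hw => hL w (by simp [hw])
    simp only [List.foldl_cons, pvSum]
    rw [iht _ (by simp [length_pvV, ha, hu]) ht,
        iht _ (by simp [length_pvV, hu]) ht]
    rw [pvV_zeros_left' _ _ hu, ← pvV_assoc]

theorem pvSum_cons (n : Int) (f : Int → List Int) (u : Int) (t : List Int)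
    (hu : (f u).length = n.toNat) (ht : ∀ w ∈ t, (f w).length = n.toNat) :
    pvSum n (u :: t) f = pvV (f u) (pvSum n t f) := by
  simp only [pvSum, List.foldl_cons]
  rw [pvSum_affine n f t _ (by simp [length_pvV, hu]) ht]
  rw [pvV_zeros_left' _ _ hu]
  simp [pvSum]

theorem pvSum_congr (n : Int) (L : List Int) (f g : Int → List Int)
    (h : ∀ u ∈ L, f u = g u) : pvSum n L f = pvSum n L g := by
  unfold pvSum
  exact PySem.List.foldl_congr_mem L _ _ _ (fun a u hu => by rw [h u hu])

theorem pvSum_add (n : Int) (L : List Int) (f g : Int → List Int)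
    (hf : ∀ u ∈ L, (f u).length = n.toNat) (hg : ∀ u ∈ L, (g u).length = n.toNat) :
    pvSum n L (fun u => pvV (f u) (g u)) = pvV (pvSum n L f) (pvSum n L g) := by
  induction L with
  | nil => simp [pvSum]; rw [pvV_zeros_right' n.toNat _ (by simp)]
  | cons u t ih =>
    have hfu := hf u (by simp); have hgu := hg u (by simp)
    have hft : ∀ w ∈ t, (f w).length = n.toNat := fun w hw => hf w (by simp [hw])
    have hgt : ∀ w ∈ t, (g w).length = n.toNat := fun w hw => hg w (by simp [hw])
    rw [pvSum_cons n _ u t (by simp [length_pvV, hfu, hgu])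
          (fun w hw => by simp [length_pvV, hft w hw, hgt w hw]),
        pvSum_cons n f u t hfu hft, pvSum_cons n g u t hgu hgt, ih hft hgt, pvV4]

theorem pvSum_append (n : Int) (f : Int → List Int)
    (hf : ∀ u, (f u).length = n.toNat) (a b : List Int) :
    pvSum n (a ++ b) f = pvV (pvSum n a f) (pvSum n b f) := by
  show (a ++ b).foldl (fun a u => pvV a (f u)) (List.replicate n.toNat 0) = _
  rw [List.foldl_append]
  exact pvSum_affine n f b _ (length_pvSum n a f (fun u _ => hf u)) (fun u _ => hf u)

theorem pvSum_flatMap (n : Int) (levels : List (Int × List Int)) (f : Int → List Int)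
    (hf : ∀ u, (f u).length = n.toNat) :
    ∀ F : List Int, pvSum n (F.flatMap (pvCh levels)) f
      = pvSum n F (fun v => pvSum n (pvCh levels v) f) := by
  intro F
  induction F with
  | nil => simp [pvSum]
  | cons v t ih =>
    rw [List.flatMap_cons, pvSum_append n f hf,
        pvSum_cons n _ v t (length_pvSum n _ f (fun u _ => hf u))
          (fun w _ => length_pvSum n _ f (fun u _ => hf u)), ih]

theorem pvU_len (z : Int) : ∀ (cs : List Int) (a : List Int), (pvU z cs a).length = a.length := by
  intro cs
  induction cs with
  | nil => intro a; rfl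
  | cons j t ih => intro a; show (pvU z t _).length = _; rw [ih, length_pvAddAt]

theorem pvU_affine (z : Int) : ∀ (cs : List Int) (a : List Int),
    pvU z cs a = pvV a (pvU z cs (List.replicate a.length 0)) := by
  intro cs
  induction cs with
  | nil => intro a; simp [pvU, pvV_zeros_right]
  | cons j t ih =>
    intro a
    show pvU z t (pvAddAt a (j - 1) z) = pvV a (pvU z t (pvAddAt _ (j - 1) z))
    rw [ih (pvAddAt a (j - 1) z), ih (pvAddAt (List.replicate a.length 0) (j - 1) z),
        length_pvAddAt, length_pvAddAt, List.length_replicate]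
    rw [pvAddAt_decomp a (j - 1) z, pvV_assoc]

-- one pass of B's outer loop over the frontier = pointwise add of the per-node contributions
theorem UF_split (z : Int) (levels : List (Int × List Int)) (n : Int) :
    ∀ (F : List Int) (add : List Int), add.length = n.toNat →
    F.foldl (fun a v => pvU z (pvCh levels v) a) add
      = pvV add (pvSum n F (fun v => pvU z (pvCh levels v) (List.replicate n.toNat 0))) := by
  intro F
  induction F with
  | nil =>
    intro add hlen
    simp only [List.foldl_nil, pvSum]
    exact (pvV_zeros_right' n.toNat add hlen).symm
  | cons v t ih =>
    intro add hlen
    simp only [List.foldl_cons]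
    rw [ih _ (by rw [pvU_len, hlen]), pvU_affine z _ add, hlen]
    rw [pvSum_cons n _ v t (by rw [pvU_len]; simp)
          (fun w _ => by rw [pvU_len]; simp), ← pvV_assoc]

theorem foldl_snoc (cs : List Int) : ∀ acc : List Int,
    cs.foldl (fun l j => l ++ [j]) acc = acc ++ cs := by
  induction cs with
  | nil => intro acc; simp
  | cons j t ih => intro acc; simp [ih]

-- B's inner pair-accumulating fold, split into its two independent components
theorem pairfold (z : Int) (ch : Int → List Int) :
    ∀ (F : List Int) (add acc : List Int),
    F.foldl (fun (st : List Int × List Int) v =>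
        (ch v).foldl (fun st j => (pvAddAt st.1 (j - 1) z, st.2 ++ [j])) st) (add, acc)
      = (F.foldl (fun a v => pvU z (ch v) a) add, acc ++ F.flatMap ch) := by
  intro F
  induction F with
  | nil => intro add acc; simp
  | cons v t ih =>
    intro add acc
    simp only [List.foldl_cons]
    rw [PySem.List.foldl_prod_mk (f := fun a j => pvAddAt a (j - 1) z)
          (g := fun l j => l ++ [j]) (l := ch v) (a := add) (b := acc)]
    rw [ih, foldl_snoc]
    simp [pvU]

-- A's one-level unfolding: adddigFuel (f+1) u = (adds at u's children) + Σ over children of adddigFuel f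
theorem adddigFuel_succ (z : Int) (levels : List (Int × List Int)) (n : Int) (f : Nat) (u : Int) :
    adddigFuel (f + 1) u z levels n
      = pvV (pvU z (pvCh levels u) (List.replicate n.toNat 0))
            (pvSum n (pvCh levels u) (fun j => adddigFuel f j z levels n)) := by
  have split : ∀ (cs : List Int) (a : List Int), a.length = n.toNat →
      cs.foldl (fun add j =>
          List.zipWith (· + ·) (pvAddAt add (j - 1) z) (adddigFuel f j z levels n)) a
        = pvV (pvU z cs a) (pvSum n cs (fun j => adddigFuel f j z levels n)) := by
    intro cs
    induction cs with
    | nil =>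
      intro a ha
      simp only [List.foldl_nil, pvU, pvSum]
      exact (pvV_zeros_right' n.toNat a ha).symm
    | cons j t ih =>
      intro a ha
      simp only [List.foldl_cons]
      have hB0 : (pvV (pvAddAt a (j-1) z) (adddigFuel f j z levels n)).length = n.toNat := by
        simp [length_pvV, length_pvAddAt, ha, adddigFuel_length]
      show List.foldl (fun add j =>
            List.zipWith (· + ·) (pvAddAt add (j - 1) z) (adddigFuel f j z levels n))
          (pvV (pvAddAt a (j-1) z) (adddigFuel f j z levels n)) t = _
      rw [ih _ hB0]
      rw [pvU_affine z t (pvV (pvAddAt a (j-1) z) (adddigFuel f j z levels n)), hB0]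
      rw [show pvU z (j :: t) a = pvU z t (pvAddAt a (j-1) z) from rfl,
          pvU_affine z t (pvAddAt a (j-1) z), length_pvAddAt, ha]
      rw [pvSum_cons n _ j t (adddigFuel_length z levels n f j)
            (fun w _ => adddigFuel_length z levels n f w)]
      apply List.ext_getElem
      · simp [pvV]; omega
      · intro m h1 h2; simp [pvV]; ring
  cases hfind : levels.find? (fun e => e.1 == u) with
  | none =>
    have hch : pvCh levels u = [] := by simp [pvCh, hfind]
    simp only [adddigFuel, hfind, hch, pvU, List.foldl_nil, pvSum]
    exact (pvV_zeros_right' n.toNat _ (by simp)).symm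
  | some e =>
    have hch : pvCh levels u = e.2 := by simp [pvCh, hfind]
    simp only [adddigFuel, hfind, hch]
    exact split e.2 _ (by simp)

-- B's fueled loop computes add + Σ over the frontier of A's recursion, as long as the
-- (multiset) frontier dies within the fuel
theorem bfs_eq (z : Int) (levels : List (Int × List Int)) (n : Int)
    (children : PySem.Dict Int (List Int))
    (hch : ∀ v, children.getD v [] = pvCh levels v) :
    ∀ (f : Nat) (F add : List Int), (pvMstep levels)^[f] F = [] → add.length = n.toNat →
    pvBfs children z f F add
      = pvV add (pvSum n F (fun v => adddigFuel f v z levels n)) := by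
  intro f
  induction f with
  | zero =>
    intro F add hdie hlen
    simp only [Function.iterate_zero, id] at hdie
    subst hdie
    simp only [pvBfs, pvSum, List.foldl_nil]
    exact (pvV_zeros_right' n.toNat add hlen).symm
  | succ f ih =>
    intro F add hdie hlen
    by_cases hF : F = []
    · subst hF
      simp only [pvBfs, List.isEmpty_nil, if_true, pvSum, List.foldl_nil]
      exact (pvV_zeros_right' n.toNat add hlen).symm
    · have hie : F.isEmpty = false := by simpa [List.isEmpty_iff] using hF
      simp only [pvBfs, hie, Bool.false_eq_true, if_false]
      rw [PySem.List.foldl_congr_mem F _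
            (fun (st : List Int × List Int) v =>
              (pvCh levels v).foldl (fun st j => (pvAddAt st.1 (j - 1) z, st.2 ++ [j])) st)
            (add, ([] : List Int)) (fun st v _ => by rw [hch v])]
      rw [pairfold z (pvCh levels) F add []]
      simp only [List.nil_append]
      have hdie' : (pvMstep levels)^[f] (F.flatMap (pvCh levels)) = [] := by
        have := hdie
        rw [Function.iterate_succ_apply] at this
        exact this
      have hlen' : (F.foldl (fun a v => pvU z (pvCh levels v) a) add).length = n.toNat := by
        have : ∀ (G : List Int) (a : List Int),
            (G.foldl (fun a v => pvU z (pvCh levels v) a) a).length = a.length := by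
          intro G
          induction G with
          | nil => intro a; rfl
          | cons v t iht => intro a; simp only [List.foldl_cons]; rw [iht, pvU_len]
        rw [this, hlen]
      rw [ih _ _ hdie' hlen']
      rw [UF_split z levels n F add hlen]
      rw [pvSum_flatMap n levels _ (adddigFuel_length z levels n f) F]
      rw [pvSum_congr n F (fun v => adddigFuel (f+1) v z levels n)
            (fun v => pvV (pvU z (pvCh levels v) (List.replicate n.toNat 0))
              (pvSum n (pvCh levels v) (fun j => adddigFuel f j z levels n)))
            (fun v _ => adddigFuel_succ z levels n f v)]
      rw [pvSum_add n F _ _ (fun v _ => by rw [pvU_len]; simp)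
            (fun v _ => length_pvSum n _ _ (fun w _ => adddigFuel_length z levels n f w))]
      rw [pvV_assoc]

-- the multiset frontier is covered by Pre_'s deduplicated frontier
theorem mstep_subset (levels : List (Int × List Int)) :
    ∀ (k : Nat) (F G : List Int), (∀ a ∈ F, a ∈ G) →
    ∀ a ∈ (pvMstep levels)^[k] F, a ∈ (pvStep levels)^[k] G := by
  intro k
  induction k with
  | zero => intro F G hFG a ha; simpa using hFG a (by simpa using ha)
  | succ k ih =>
    intro F G hFG a ha
    rw [Function.iterate_succ_apply] at ha ⊢
    refine ih (pvMstep levels F) (pvStep levels G) ?_ a ha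
    intro b hb
    simp only [pvMstep, List.mem_flatMap] at hb
    obtain ⟨v, hv, hbv⟩ := hb
    simp only [pvStep, List.mem_dedup, List.mem_flatMap]
    exact ⟨v, hFG v hv, hbv⟩

theorem mstep_dies (levels : List (Int × List Int)) (x : Int)
    (h : (pvStep levels)^[levels.length + 1] [x] = []) :
    (pvMstep levels)^[levels.length + 2] [x] = [] := by
  have h1 : (pvMstep levels)^[levels.length + 1] [x] = [] := by
    rw [List.eq_nil_iff_forall_not_mem]
    intro a ha
    have := mstep_subset levels (levels.length + 1) [x] [x] (fun b hb => hb) a ha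
    rw [h] at this
    simp at this
  have : (pvMstep levels)^[levels.length + 2] [x]
      = pvMstep levels ((pvMstep levels)^[levels.length + 1] [x]) :=
    Function.iterate_succ_apply' _ _ _
  rw [this, h1]
  rfl

-- B's children dict reads back the first matching levels entry
theorem children_get? (levels : List (Int × List Int)) (u : Int) :
    ∀ d : PySem.Dict Int (List Int),
      (levels.foldl (fun d e => d.setdefault e.1 e.2) d).get? u
        = (d.get? u).orElse (fun _ => (levels.find? (fun e => e.1 == u)).map Prod.snd) := by
  induction levels with
  | nil =>
    intro d
    simp only [List.foldl_nil, List.find?_nil, Option.map_none]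
    cases h : d.get? u <;> simp [h, Option.orElse]
  | cons e t ih =>
    intro d
    simp only [List.foldl_cons]
    rw [ih]
    by_cases hc : d.contains e.1
    · rw [PySem.Dict.setdefault_of_contains d e.2 hc]
      cases hgu : d.get? u with
      | some v => simp [Option.orElse]
      | none =>
        have hne : (e.1 == u) = false := by
          rw [beq_eq_false_iff_ne]
          intro h
          rw [h, PySem.Dict.contains_eq_isSome_get?, hgu] at hc
          simp at hc
        simp [Option.orElse, List.find?_cons, hne]
    · rw [PySem.Dict.setdefault_of_not_contains d e.2 (by simpa using hc)]
      by_cases heu : u = e.1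
      · have hgu : d.get? e.1 = none := by
          rw [PySem.Dict.get?_eq_none_iff_contains]
          simpa using hc
        rw [PySem.Dict.get?_insert d e.1 u e.2]
        simp [heu, hgu, Option.orElse, List.find?_cons,
          show (e.1 == u) = true by simp [heu]]
      · rw [PySem.Dict.get?_insert d e.1 u e.2]
        have hne : (e.1 == u) = false := by
          rw [beq_eq_false_iff_ne]; exact fun h => heu h.symm
        simp [heu, Option.orElse, List.find?_cons, hne]

theorem children_getD (levels : List (Int × List Int)) (u : Int) :
    (levels.foldl (fun d e => d.setdefault e.1 e.2)
      (PySem.Dict.empty : PySem.Dict Int (List Int))).getD u [] = pvCh levels u := by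
  rw [PySem.Dict.getD_eq_get?_getD, children_get? levels u PySem.Dict.empty]
  simp [pvCh, Option.orElse]

-- ===== VERDICT =====
theorem adddig_spec : Claim_equal_adddig := by
  intro x z levels n _ hpre
  unfold Spec_adddig
  unfold adddig adddig_alt
  rw [bfs_eq z levels n _ (children_getD levels) (levels.length + 2) [x]
        (List.replicate n.toNat 0) (mstep_dies levels x hpre.1) (by simp)]
  rw [pvSum_cons n _ x [] (adddigFuel_length z levels n _ x) (by simp)]
  rw [show pvSum n ([] : List Int) (fun v => adddigFuel (levels.length + 2) v z levels n)
        = List.replicate n.toNat 0 from rfl]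
  rw [pvV_zeros_right' n.toNat _ (adddigFuel_length z levels n _ x)]
  rw [pvV_zeros_left' n.toNat _ (adddigFuel_length z levels n _ x)]
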